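-- pv_equiv track=rewrite | github.com/SebastianRegalado/Multi-Answer-Summarization-for-CHF | preprocessing.py | filter_punctuation_matches
-- ===== SOURCE A (Python) =====
-- import typing as T
--
-- def filter_punctuation_matches(punct_matches: T.List[int], url_matches: T.List[T.Tuple[int, int]]):
--     valid_matches = []
--     for p in punct_matches:
--         is_valid = True
--         for start, end in url_matches:
--             if start <= p < end:
--                 is_valid = False
--                 break
--         if is_valid:
--             valid_matches.append(p)
--     return valid_matches
-- ===== SOURCE B (Python) =====
-- import typing as T
--
-- def filter_punctuation_matches(punct_matches: T.List[int], url_matches: T.List[T.Tuple[int, int]]):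
--     # sort intervals by start, merge overlapping/touching ones once,
--     # then test each position against the merged list with an early exit
--     ivs = sorted(url_matches, key=lambda iv: iv[0])
--     merged = []
--     for s, e in ivs:
--         if e <= s:
--             continue  # empty interval: contains nothing
--         if merged and s <= merged[-1][1]:
--             if merged[-1][1] < e:
--                 merged[-1] = (merged[-1][0], e)
--         else:
--             merged.append((s, e))
--     def inside(p):
--         for s, e in merged:
--             if p < s:
--                 return False
--             if p < e:
--                 return True
--         return False
--     return [p for p in punct_matches if not inside(p)]
-- ===== Notes on version B (the rewrite author's own statement) =====
-- stated objective: faster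
-- what changed: Replaces the nested loop (every position tested against every raw interval) by sorting the intervals by start once, merging overlapping ones in a single pass, and testing each position against the sorted merged list with an early exit once an interval's start exceeds the position.
import Mathlib
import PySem

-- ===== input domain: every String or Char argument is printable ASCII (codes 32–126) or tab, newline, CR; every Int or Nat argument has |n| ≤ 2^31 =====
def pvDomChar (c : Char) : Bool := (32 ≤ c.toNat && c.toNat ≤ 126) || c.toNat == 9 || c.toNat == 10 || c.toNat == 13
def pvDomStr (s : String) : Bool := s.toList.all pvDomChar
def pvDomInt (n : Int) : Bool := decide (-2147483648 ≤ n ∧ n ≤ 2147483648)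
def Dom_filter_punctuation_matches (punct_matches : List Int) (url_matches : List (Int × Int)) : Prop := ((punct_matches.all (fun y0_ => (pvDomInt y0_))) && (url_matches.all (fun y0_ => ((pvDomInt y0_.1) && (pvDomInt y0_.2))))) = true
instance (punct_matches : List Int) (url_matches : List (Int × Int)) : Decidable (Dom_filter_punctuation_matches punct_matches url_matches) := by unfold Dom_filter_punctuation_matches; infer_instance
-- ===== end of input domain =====

-- B replaces A's nested loop over all intervals by sort-by-start + one merge pass +
-- an ordered scan with early exit per position (objective: alternative; same results, order preserved).

-- ===== PORT A =====
-- inner 'for start, end … if start <= p < end: is_valid = False; break' loop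
def pvCheckA (p : Int) : List (Int × Int) → Bool
  | [] => true
  | (s, e) :: rest => if s ≤ p ∧ p < e then false else pvCheckA p rest

def filter_punctuation_matches (punct_matches : List Int) (url_matches : List (Int × Int)) : List Int :=
  punct_matches.foldl (fun acc p => if pvCheckA p url_matches then acc ++ [p] else acc) []

-- ===== PORT B =====
-- merge loop; 'acc' holds the merged list in reverse (head = merged[-1])
def pvMergeB : List (Int × Int) → List (Int × Int) → List (Int × Int)
  | acc, [] => acc.reverse
  | acc, (s, e) :: rest =>
    if e ≤ s then pvMergeB acc rest
    else
      match acc with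
      | (a, b) :: t =>
        if s ≤ b then pvMergeB ((a, if b < e then e else b) :: t) rest
        else pvMergeB ((s, e) :: (a, b) :: t) rest
      | [] => pvMergeB [(s, e)] rest

-- 'inside(p)': scan merged intervals, early exit once p < start
def pvInsideB (p : Int) : List (Int × Int) → Bool
  | [] => false
  | (s, e) :: rest => if p < s then false else if p < e then true else pvInsideB p rest

def filter_punctuation_matches_alt (punct_matches : List Int) (url_matches : List (Int × Int)) : List Int :=
  let merged := pvMergeB [] (PySem.List.sorted url_matches (fun iv => iv.1) false)
  punct_matches.filter (fun p => !(pvInsideB p merged))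

-- ===== PRECONDITION & SPEC =====
def Spec_filter_punctuation_matches (punct_matches : List Int) (url_matches : List (Int × Int)) (out : List Int) : Prop := out = filter_punctuation_matches_alt punct_matches url_matches
instance (punct_matches : List Int) (url_matches : List (Int × Int)) (out : List Int) : Decidable (Spec_filter_punctuation_matches punct_matches url_matches out) := by unfold Spec_filter_punctuation_matches; infer_instance

-- ===== CLAIM (what is proved, stated in full; the proofs are below) =====
def Claim_equal_filter_punctuation_matches : Prop := ∀ (punct_matches : List Int) (url_matches : List (Int × Int)), Dom_filter_punctuation_matches punct_matches url_matches → Spec_filter_punctuation_matches punct_matches url_matches (filter_punctuation_matches punct_matches url_matches)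

-- ===== LEMMAS AND PROOFS =====

-- Bool test "interval iv contains p"
def pvHit (p : Int) (iv : Int × Int) : Bool := decide (iv.1 ≤ p ∧ p < iv.2)

lemma pvCheckA_eq_not_any (p : Int) (l : List (Int × Int)) :
    pvCheckA p l = !(l.any (pvHit p)) := by
  induction l with
  | nil => rfl
  | cons hd tl ih =>
    obtain ⟨s, e⟩ := hd
    simp only [pvCheckA, List.any_cons, pvHit]
    by_cases h : s ≤ p ∧ p < e <;> simp [h, ih]

-- the merge loop preserves which positions are covered
lemma pvMergeB_any (p : Int) :
    ∀ (rest acc : List (Int × Int)),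
      rest.Pairwise (fun x y => x.1 ≤ y.1) →
      (∀ iv ∈ rest, ∀ hd t, acc = hd :: t → hd.1 ≤ iv.1) →
      (pvMergeB acc rest).any (pvHit p) = (acc.any (pvHit p) || rest.any (pvHit p)) := by
  intro rest
  induction rest with
  | nil => intro acc _ _; simp [pvMergeB]
  | cons hd tl ih =>
    obtain ⟨s, e⟩ := hd
    intro acc hpw hlink
    have hpw' := (List.pairwise_cons.mp hpw).2
    have hhd := (List.pairwise_cons.mp hpw).1
    simp only [pvMergeB]
    by_cases hemp : e ≤ s
    · simp only [hemp, if_true]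
      rw [ih acc hpw' (fun iv hiv => hlink iv (List.mem_cons_of_mem _ hiv))]
      have : pvHit p (s, e) = false := by simp [pvHit]; omega
      simp [this]
    · simp only [hemp, if_false]
      match acc with
      | [] =>
        rw [ih [(s, e)] hpw' ?_]
        · simp
        · intro iv hiv hd t heq
          cases heq
          exact hhd iv hiv
      | (a, b) :: t =>
        have has : a ≤ s := hlink (s, e) (List.mem_cons_self) (a, b) t rfl
        by_cases hsb : s ≤ b
        · simp only [hsb, if_true]
          rw [ih _ hpw' ?_]
          · have : pvHit p (a, if b < e then e else b) =
                (pvHit p (a, b) || pvHit p (s, e)) := by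
              split_ifs with hblt <;>
                simp only [pvHit, ← Bool.decide_or, decide_eq_decide] <;> omega
            simp only [List.any_cons, this]
            ac_rfl
          · intro iv hiv hd t' heq
            cases heq
            exact hlink iv (List.mem_cons_of_mem _ hiv) (a, b) t rfl
        · simp only [hsb, if_false]
          rw [ih _ hpw' ?_]
          · simp only [List.any_cons]; ac_rfl
          · intro iv hiv hd t' heq
            cases heq
            exact hhd iv hiv

-- the merge loop's output is sorted by start
lemma pvMergeB_pairwise :
    ∀ (rest acc : List (Int × Int)),
      rest.Pairwise (fun x y => x.1 ≤ y.1) →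
      acc.Pairwise (fun x y => y.1 ≤ x.1) →
      (∀ iv ∈ rest, ∀ a ∈ acc, a.1 ≤ iv.1) →
      (pvMergeB acc rest).Pairwise (fun x y => x.1 ≤ y.1) := by
  intro rest
  induction rest with
  | nil =>
    intro acc _ hacc _
    simpa [pvMergeB, List.pairwise_reverse] using hacc
  | cons hd tl ih =>
    obtain ⟨s, e⟩ := hd
    intro acc hpw hacc hlink
    have hpw' := (List.pairwise_cons.mp hpw).2
    have hhd := (List.pairwise_cons.mp hpw).1
    simp only [pvMergeB]
    by_cases hemp : e ≤ s
    · simp only [hemp, if_true]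
      exact ih acc hpw' hacc (fun iv hiv => hlink iv (List.mem_cons_of_mem _ hiv))
    · simp only [hemp, if_false]
      match acc with
      | [] =>
        refine ih [(s, e)] hpw' (by simp) ?_
        intro iv hiv a ha
        simp at ha; cases ha
        exact hhd iv hiv
      | (a, b) :: t =>
        by_cases hsb : s ≤ b
        · simp only [hsb, if_true]
          refine ih _ hpw' ?_ ?_
          · have := List.pairwise_cons.mp hacc
            exact List.pairwise_cons.mpr ⟨this.1, this.2⟩
          · intro iv hiv x hx
            rcases List.mem_cons.mp hx with h | h
            · subst h
              exact hlink iv (List.mem_cons_of_mem _ hiv) (a, b) (by simp)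
            · exact hlink iv (List.mem_cons_of_mem _ hiv) x (List.mem_cons_of_mem _ h)
        · simp only [hsb, if_false]
          refine ih _ hpw' ?_ ?_
          · refine List.pairwise_cons.mpr ⟨?_, hacc⟩
            intro y hy
            exact hlink (s, e) List.mem_cons_self y hy
          · intro iv hiv x hx
            rcases List.mem_cons.mp hx with h | h
            · subst h; exact hhd iv hiv
            · calc x.1 ≤ s := hlink (s, e) List.mem_cons_self x h
                _ ≤ iv.1 := hhd iv hiv

-- on a start-sorted list, the early-exit scan decides coverage
lemma pvInsideB_eq_any (p : Int) :
    ∀ (l : List (Int × Int)), l.Pairwise (fun x y => x.1 ≤ y.1) →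
      pvInsideB p l = l.any (pvHit p) := by
  intro l
  induction l with
  | nil => intro _; rfl
  | cons hd tl ih =>
    obtain ⟨s, e⟩ := hd
    intro hpw
    have hhd := (List.pairwise_cons.mp hpw).1
    have hpw' := (List.pairwise_cons.mp hpw).2
    simp only [pvInsideB, List.any_cons]
    by_cases h1 : p < s
    · have hh : pvHit p (s, e) = false := by simp [pvHit]; omega
      have ht : tl.any (pvHit p) = false := by
        rw [List.any_eq_false]
        intro iv hiv
        have := hhd iv hiv
        simp [pvHit]; omega
      simp [h1, hh, ht]
    · by_cases h2 : p < e
      · have hh : pvHit p (s, e) = true := by simp [pvHit]; omega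
        simp [h1, h2, hh]
      · have hh : pvHit p (s, e) = false := by simp [pvHit]; omega
        simp [h1, h2, hh, ih hpw']

lemma pvB_point (p : Int) (um : List (Int × Int)) :
    pvInsideB p (pvMergeB [] (PySem.List.sorted um (fun iv => iv.1) false)) = um.any (pvHit p) := by
  have hpw : (PySem.List.sorted um (fun iv => iv.1) false).Pairwise (fun x y => x.1 ≤ y.1) :=
    PySem.List.sorted_pairwise um (fun iv => iv.1)
  rw [pvInsideB_eq_any p _ (pvMergeB_pairwise _ [] hpw (by simp) (by simp))]
  rw [pvMergeB_any p _ [] hpw (by simp)]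
  simp only [List.any_nil, Bool.false_or]
  exact List.Perm.any_eq (PySem.List.sorted_perm um (fun iv => iv.1) false)

-- ===== VERDICT (by name: the statement is the Claim_ definition above) =====
theorem filter_punctuation_matches_spec : Claim_equal_filter_punctuation_matches := by
  intro pm um _
  unfold Spec_filter_punctuation_matches filter_punctuation_matches filter_punctuation_matches_alt
  rw [PySem.List.foldl_append_if_eq_filter]
  simp only [List.nil_append]
  refine List.filter_congr ?_
  intro p _
  rw [pvCheckA_eq_not_any, pvB_point]
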